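-- pv_equiv track=rewrite | github.com/Samuel-BlankAmber/aes-stego | encode.py | nearest_neighbour_upscale
-- ===== SOURCE A (Python) =====
-- def nearest_neighbour_upscale(pixel_data, width, height, scale):
--     pixel_data_2d = [pixel_data[i:i + width // scale]
--                      for i in range(0, len(pixel_data), width // scale)]
--
--     new_pixel_data_2d = []
--     for row in pixel_data_2d:
--         new_row = []
--         for pixel in row:
--             new_row += [pixel] * scale
--         if len(new_row) < width:
--             new_row += [row[-1] for _ in range(width - len(new_row))]
--         new_pixel_data_2d += [new_row] * scale
--     if len(new_pixel_data_2d) < height: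
--         new_pixel_data_2d += [new_pixel_data_2d[-1]
--                               for _ in range(height - len(new_pixel_data_2d))]
--
--     new_pixel_data = [pixel for row in new_pixel_data_2d for pixel in row]
--     return new_pixel_data
-- ===== SOURCE B (Python) =====
-- def nearest_neighbour_upscale(pixel_data, width, height, scale):
--     sw = width // scale
--     source = [pixel_data[i:i + sw] for i in range(0, len(pixel_data), sw)]
--     nrows = len(source)
--     out_height = max(nrows * scale, height)
--     out = []
--     for y in range(out_height):
--         row = source[min(y // scale, nrows - 1)]
--         for x in range(width):
--             out.append(row[min(x // scale, len(row) - 1)])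
--     return out
-- ===== Notes on version B (the rewrite author's own statement) =====
-- stated objective: alternative
-- what changed: A builds the upscaled image as nested lists (per-row pixel replication, row padding, row replication, then bottom padding, then flatten); B emits the output directly in one coordinate-mapped double loop, reading each output cell from its clamped source index min(y//scale, nrows-1), min(x//scale, len(row)-1).
import Mathlib
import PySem

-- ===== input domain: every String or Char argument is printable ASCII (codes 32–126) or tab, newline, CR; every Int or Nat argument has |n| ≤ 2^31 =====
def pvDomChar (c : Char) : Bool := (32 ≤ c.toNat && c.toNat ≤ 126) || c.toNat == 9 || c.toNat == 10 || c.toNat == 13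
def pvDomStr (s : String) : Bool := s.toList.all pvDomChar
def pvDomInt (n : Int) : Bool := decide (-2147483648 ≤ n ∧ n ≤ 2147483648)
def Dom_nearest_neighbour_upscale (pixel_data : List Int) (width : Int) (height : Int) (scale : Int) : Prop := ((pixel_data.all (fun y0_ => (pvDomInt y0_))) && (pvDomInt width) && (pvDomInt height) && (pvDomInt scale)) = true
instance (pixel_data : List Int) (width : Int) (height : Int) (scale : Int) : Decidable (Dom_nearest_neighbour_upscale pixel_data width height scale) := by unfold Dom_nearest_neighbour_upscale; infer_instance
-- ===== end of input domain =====

-- B replaces A's replicate-rows-then-pad construction by a direct coordinate-mapping pass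
-- (each output cell reads its clamped source pixel); objective: alternative decomposition, same cost.

-- ===== PORT A =====
-- Literal transliteration of A.  'width // scale' is PySem.Int.floordiv (named sw once; Python
-- recomputes the same value).  'row[-1]' / 'new_pixel_data_2d[-1]' are pyGetD _ (-1) _: under
-- Pre_ the list is nonempty whenever that branch runs, so the default is unreachable there.
def nearest_neighbour_upscale (pixel_data : List Int) (width : Int) (height : Int) (scale : Int) : List Int :=
  let sw := PySem.Int.floordiv width scale
  let pixel_data_2d := (PySem.List.pyRange 0 (pixel_data.length : Int) sw).map
      (fun i => PySem.List.slice pixel_data (some i) (some (i + sw)))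
  let new_pixel_data_2d := pixel_data_2d.foldl (fun acc row =>
      let new_row := row.foldl (fun nr pixel => nr ++ List.replicate scale.toNat pixel) []
      let new_row2 := if (new_row.length : Int) < width
          then new_row ++ List.replicate (width - (new_row.length : Int)).toNat (PySem.List.pyGetD row (-1) 0)
          else new_row
      acc ++ List.replicate scale.toNat new_row2) []
  let new_pixel_data_2d2 := if (new_pixel_data_2d.length : Int) < height
      then new_pixel_data_2d ++ List.replicate (height - (new_pixel_data_2d.length : Int)).toNat (PySem.List.pyGetD new_pixel_data_2d (-1) ([] : List Int))
      else new_pixel_data_2d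
  new_pixel_data_2d2.foldl (fun acc row => acc ++ row) []

-- ===== PORT B =====
-- Literal transliteration of Source B: same source grid, then one coordinate-mapped double loop.
def nearest_neighbour_upscale_alt (pixel_data : List Int) (width : Int) (height : Int) (scale : Int) : List Int :=
  let sw := PySem.Int.floordiv width scale
  let source := (PySem.List.pyRange 0 (pixel_data.length : Int) sw).map
      (fun i => PySem.List.slice pixel_data (some i) (some (i + sw)))
  let nrows : Int := (source.length : Int)
  let out_height := max (nrows * scale) height
  (PySem.List.pyRange 0 out_height 1).foldl (fun out y =>
      let row := PySem.List.pyGetD source (min (PySem.Int.floordiv y scale) (nrows - 1)) ([] : List Int)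
      (PySem.List.pyRange 0 width 1).foldl (fun out x =>
          out ++ [PySem.List.pyGetD row (min (PySem.Int.floordiv x scale) ((row.length : Int) - 1)) 0]) out) []

-- ===== PRECONDITION & SPEC =====
-- Pre_ is exactly the set of inputs on which Python A returns normally: it excludes scale = 0
-- (ZeroDivisionError), width // scale = 0 (ValueError: range step 0), and the case height > 0
-- with no produced rows (empty pixel_data, negative step, or nonpositive scale: IndexError on [-1]).
def Pre_nearest_neighbour_upscale (pixel_data : List Int) (width : Int) (height : Int) (scale : Int) : Prop :=
  scale ≠ 0 ∧ PySem.Int.floordiv width scale ≠ 0 ∧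
    (height ≤ 0 ∨ (0 < PySem.Int.floordiv width scale ∧ 0 < scale ∧ pixel_data ≠ []))
instance (pixel_data : List Int) (width : Int) (height : Int) (scale : Int) : Decidable (Pre_nearest_neighbour_upscale pixel_data width height scale) := by unfold Pre_nearest_neighbour_upscale; infer_instance

def pvWitness_nearest_neighbour_upscale : List Int × Int × Int × Int := ([1, 2, 3, 4], 4, 5, 2)

def Spec_nearest_neighbour_upscale (pixel_data : List Int) (width : Int) (height : Int) (scale : Int) (out : List Int) : Prop := out = nearest_neighbour_upscale_alt pixel_data width height scale
instance (pixel_data : List Int) (width : Int) (height : Int) (scale : Int) (out : List Int) : Decidable (Spec_nearest_neighbour_upscale pixel_data width height scale out) := by unfold Spec_nearest_neighbour_upscale; infer_instance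

-- ===== CLAIM (what is proved, stated in full; the proofs are below) =====
def Claim_equal_nearest_neighbour_upscale : Prop := ∀ (pixel_data : List Int) (width : Int) (height : Int) (scale : Int), Dom_nearest_neighbour_upscale pixel_data width height scale → Pre_nearest_neighbour_upscale pixel_data width height scale → Spec_nearest_neighbour_upscale pixel_data width height scale (nearest_neighbour_upscale pixel_data width height scale)

-- ===== LEMMAS AND PROOFS =====

theorem pvClampMap {β : Type} (f : Nat → β) (k n H : Nat) (hk : 0 < k) (hn : 0 < n) (hH : n * k ≤ H) :
    (List.range H).map (fun y => f (min (y / k) (n - 1))) =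
      (List.range (n * k)).map (fun y => f (y / k)) ++ List.replicate (H - n * k) (f (n - 1)) := by
  have hsplit : H = n * k + (H - n * k) := by omega
  conv_lhs => rw [hsplit]
  rw [List.range_add, List.map_append]
  congr 1
  · apply List.map_congr_left
    intro y hy
    have hy' : y < n * k := List.mem_range.mp hy
    have : y / k < n := (Nat.div_lt_iff_lt_mul hk).mpr (by omega)
    rw [min_eq_left (by omega)]
  · rw [List.map_map]
    have hc : ∀ x ∈ List.range (H - n * k),
        ((fun y => f (min (y / k) (n - 1))) ∘ (fun x => n * k + x)) x = f (n - 1) := by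
      intro x _
      have hdiv : (n * k + x) / k = n + x / k := by
        rw [Nat.mul_comm n k, Nat.mul_add_div hk]
      simp only [Function.comp_apply, hdiv]
      rw [min_eq_right (le_trans (Nat.sub_le n 1) (Nat.le_add_right n _))]
    rw [List.map_congr_left hc, List.map_const', List.length_range]

theorem pvFlatRep {α β : Type} (k : Nat) (hk : 0 < k) (f : α → β) (src : List α) (d : α) :
    src.flatMap (fun c => List.replicate k (f c)) =
      (List.range (src.length * k)).map (fun y => f (src.getD (y / k) d)) := by
  induction src with
  | nil => simp
  | cons c tl ih =>
    rw [List.flatMap_cons, ih]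
    have hlen : (c :: tl).length * k = k + tl.length * k := by simp [List.length_cons]; ring
    rw [hlen, List.range_add, List.map_append, List.map_map]
    congr 1
    · have : ∀ y ∈ List.range k, f ((c :: tl).getD (y / k) d) = f c := by
        intro y hy
        have : y / k = 0 := Nat.div_eq_of_lt (List.mem_range.mp hy)
        simp [this]
      rw [List.map_congr_left this, List.map_const', List.length_range]
    · apply List.map_congr_left
      intro x _
      simp only [Function.comp_apply]
      have : (k + x) / k = x / k + 1 := by
        rw [Nat.add_div_left _ hk]
      rw [this, List.getD_cons_succ]

theorem pvGetLastMapRange {β : Type} (f : Nat → β) (m : Nat) (h : (List.range m).map f ≠ []) :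
    ((List.range m).map f).getLast h = f (m - 1) := by
  have hm : 0 < m := by
    by_contra hm
    exact h (by simp [Nat.le_zero.mp (Nat.not_lt.mp hm)])
  rw [List.getLast_eq_getElem]
  simp [List.getElem_map, List.getElem_range, List.length_range]

theorem pvMainSrc (src : List (List Int)) (width height scale : Int)
    (hs : 0 < scale) (hsrc : src ≠ [])
    (hmem : ∀ c ∈ src, c ≠ [] ∧ (c.length : Int) * scale ≤ width) :
    (let rows2 := src.foldl (fun acc row =>
        let nr := row.foldl (fun nr pixel => nr ++ List.replicate scale.toNat pixel) []
        let nr2 := if (nr.length : Int) < width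
            then nr ++ List.replicate (width - (nr.length : Int)).toNat (PySem.List.pyGetD row (-1) 0)
            else nr
        acc ++ List.replicate scale.toNat nr2) []
     let rows3 := if (rows2.length : Int) < height
        then rows2 ++ List.replicate (height - (rows2.length : Int)).toNat (PySem.List.pyGetD rows2 (-1) ([] : List Int))
        else rows2
     rows3.foldl (fun acc row => acc ++ row) [])
    = (PySem.List.pyRange 0 (max ((src.length : Int) * scale) height) 1).foldl (fun out y =>
        let row := PySem.List.pyGetD src (min (PySem.Int.floordiv y scale) ((src.length : Int) - 1)) ([] : List Int)
        (PySem.List.pyRange 0 width 1).foldl (fun out x =>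
            out ++ [PySem.List.pyGetD row (min (PySem.Int.floordiv x scale) ((row.length : Int) - 1)) 0]) out) [] := by
  dsimp only
  have hk : 0 < scale.toNat := by omega
  have hsc : scale = (scale.toNat : Int) := (Int.toNat_of_nonneg hs.le).symm
  set k := scale.toNat with hkdef
  have hn : 0 < src.length := List.length_pos_iff.mpr hsrc
  set n := src.length with hndef
  have hw : 0 < width := by
    obtain ⟨hne, hlen⟩ := hmem (src.head hsrc) (List.head_mem hsrc)
    have h1 : 0 < (src.head hsrc).length := List.length_pos_iff.mpr hne
    nlinarith [hlen]
  have hwc : width = (width.toNat : Int) := (Int.toNat_of_nonneg hw.le).symm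
  set W := width.toNat with hWdef
  set H := (max ((n : Int) * scale) height).toNat with hHdef
  have hcast : ((n * k : Nat) : Int) = (n : Int) * scale := by push_cast [hsc]; ring
  have hnkH : n * k ≤ H := by omega
  -- per-row normalisation
  have hrow : ∀ row ∈ src, ∀ nr, nr = row.foldl (fun nr pixel => nr ++ List.replicate k pixel) [] →
      (if (nr.length : Int) < width
        then nr ++ List.replicate (width - (nr.length : Int)).toNat (PySem.List.pyGetD row (-1) 0)
        else nr)
      = (List.range W).map (fun x => row.getD (min (x / k) (row.length - 1)) 0) := by
    intro row hrm nr hnr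
    obtain ⟨hne, hlen⟩ := hmem row hrm
    have hL1 : 0 < row.length := List.length_pos_iff.mpr hne
    have hLW : row.length * k ≤ W := by
      have : ((row.length * k : Nat) : Int) ≤ width := by push_cast [hsc] at hlen ⊢; linarith
      omega
    have hfm : nr = (List.range (row.length * k)).map (fun x => row.getD (x / k) 0) := by
      rw [hnr, PySem.List.foldl_append_eq_flatMap (fun pixel => List.replicate k pixel) row []]
      simpa using pvFlatRep k hk (fun c => c) row 0
    rw [hfm, pvClampMap (fun i => row.getD i 0) k row.length W hk hL1 hLW]
    simp only [List.length_map, List.length_range]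
    split_ifs with hlt
    · congr 1
      have hcnt : (width - ((row.length * k : Nat) : Int)).toNat = W - row.length * k := by omega
      rw [hcnt, PySem.List.pyGetD_neg_one row 0 hne, List.getLast_eq_getElem,
        List.getD_eq_getElem row 0 (by omega)]
    · have hEq : row.length * k = W := by omega
      rw [hEq]
      simp
  -- rows2 as a range map
  have houter : ∀ r2, r2 = src.foldl (fun acc row =>
        acc ++ List.replicate k (
          if (((row.foldl (fun nr pixel => nr ++ List.replicate k pixel) []).length : Int) < width)
          then (row.foldl (fun nr pixel => nr ++ List.replicate k pixel) []) ++
            List.replicate (width - ((row.foldl (fun nr pixel => nr ++ List.replicate k pixel) []).length : Int)).toNat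
              (PySem.List.pyGetD row (-1) 0)
          else row.foldl (fun nr pixel => nr ++ List.replicate k pixel) [])) [] →
      r2 = (List.range (n * k)).map (fun y =>
          (List.range W).map (fun x => (src.getD (y / k) []).getD (min (x / k) ((src.getD (y / k) []).length - 1)) 0)) := by
    intro r2 hr2
    rw [hr2, PySem.List.foldl_congr_mem src _
        (fun acc row => acc ++ List.replicate k ((List.range W).map (fun x => row.getD (min (x / k) (row.length - 1)) 0))) []
        (by intro acc row hr; rw [hrow row hr _ rfl])]
    rw [PySem.List.foldl_append_eq_flatMap
        (fun row => List.replicate k ((List.range W).map (fun x => row.getD (min (x / k) (row.length - 1)) 0))) src []]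
    rw [List.nil_append]
    exact pvFlatRep k hk (fun row => (List.range W).map (fun x => row.getD (min (x / k) (row.length - 1)) 0)) src []
  -- the common clamped-grid form
  have hG : ∀ m : Nat, m < n →
      (PySem.List.pyRange 0 width 1).map (fun x =>
        PySem.List.pyGetD (src.getD m []) (min (PySem.Int.floordiv x scale) (((src.getD m []).length : Int) - 1)) 0)
      = (List.range W).map (fun x => (src.getD m []).getD (min (x / k) ((src.getD m []).length - 1)) 0) := by
    intro m hm
    have hmm : src.getD m [] ∈ src := by
      rw [List.getD_eq_getElem src [] (by omega)]
      exact List.getElem_mem _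
    have hne : src.getD m [] ≠ [] := (hmem _ hmm).1
    have hL1 : 0 < (src.getD m []).length := List.length_pos_iff.mpr hne
    rw [PySem.List.pyRange_one, List.map_map]
    have hWW : (width - 0).toNat = W := by omega
    rw [hWW]
    apply List.map_congr_left
    intro i _
    simp only [Function.comp_apply, zero_add]
    rw [hsc, PySem.Int.floordiv_natCast i k,
      show (((src.getD m []).length : Int) - 1) = ((((src.getD m []).length - 1 : Nat)) : Int) by omega,
      ← Nat.cast_min, PySem.List.pyGetD_natCast]
  -- B side
  have hB : (PySem.List.pyRange 0 (max ((n : Int) * scale) height) 1).foldl (fun out y =>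
        (PySem.List.pyRange 0 width 1).foldl (fun out x =>
            out ++ [PySem.List.pyGetD (PySem.List.pyGetD src (min (PySem.Int.floordiv y scale) ((n : Int) - 1)) ([] : List Int))
              (min (PySem.Int.floordiv x scale)
                (((PySem.List.pyGetD src (min (PySem.Int.floordiv y scale) ((n : Int) - 1)) ([] : List Int)).length : Int) - 1)) 0]) out) []
      = ((List.range H).map (fun y =>
          (List.range W).map (fun x => (src.getD (min (y / k) (n - 1)) []).getD (min (x / k) ((src.getD (min (y / k) (n - 1)) []).length - 1)) 0))).flatten := by
    simp only [PySem.List.foldl_append_singleton_eq_map]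
    rw [PySem.List.foldl_append_eq_flatMap, List.nil_append,
      PySem.List.pyRange_one 0 (max ((n : Int) * scale) height), List.flatMap_map, List.flatMap_def]
    have hHH : (max ((n : Int) * scale) height - 0).toNat = H := by omega
    rw [hHH]
    congr 1
    apply List.map_congr_left
    intro j hj
    have hj' : j < H := by simpa using hj
    have hmin : min (j / k) (n - 1) < n := by
      have : n - 1 < n := by omega
      omega
    have hcast2 : min (PySem.Int.floordiv ((0 : Int) + (j : Int)) scale) ((n : Int) - 1)
        = ((min (j / k) (n - 1) : Nat) : Int) := by
      rw [zero_add, hsc, PySem.Int.floordiv_natCast j k,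
        show ((n : Int) - 1) = (((n - 1 : Nat)) : Int) by omega, ← Nat.cast_min]
    rw [hcast2, PySem.List.pyGetD_natCast]
    exact hG _ hmin
  rw [hB]
  -- A side: rows2 then rows3
  have hR2 := houter _ rfl
  rw [hR2]
  rw [PySem.List.foldl_append_eq_flatten, List.nil_append]
  congr 1
  have hnk1 : 0 < n * k := Nat.mul_pos hn hk
  have hmapne : (List.range (n * k)).map (fun y =>
      (List.range W).map (fun x => (src.getD (y / k) []).getD (min (x / k) ((src.getD (y / k) []).length - 1)) 0)) ≠ [] := by
    simp only [ne_eq, List.map_eq_nil_iff, List.range_eq_nil]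
    omega
  have hdiv1 : (n * k - 1) / k = n - 1 := by
    apply Nat.div_eq_of_lt_le
    · rw [Nat.sub_mul, one_mul]
      have : k ≤ n * k := Nat.le_mul_of_pos_left k hn
      omega
    · rw [show n - 1 + 1 = n by omega]
      omega
  have hlast : PySem.List.pyGetD ((List.range (n * k)).map (fun y =>
        (List.range W).map (fun x => (src.getD (y / k) []).getD (min (x / k) ((src.getD (y / k) []).length - 1)) 0))) (-1) ([] : List Int)
      = (List.range W).map (fun x => (src.getD (n - 1) []).getD (min (x / k) ((src.getD (n - 1) []).length - 1)) 0) := by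
    rw [PySem.List.pyGetD_neg_one _ _ hmapne, pvGetLastMapRange, hdiv1]
  simp only [List.length_map, List.length_range]
  split_ifs with hlt
  · rw [hlast]
    have hcnt : (height - ((n * k : Nat) : Int)).toNat = H - n * k := by omega
    rw [hcnt, ← pvClampMap (fun i => (List.range W).map
      (fun x => (src.getD i []).getD (min (x / k) ((src.getD i []).length - 1)) 0)) k n H hk hn hnkH]
  · have hHeq : H = n * k := by omega
    rw [hHeq]
    apply List.map_congr_left
    intro y hy
    have hy' : y < n * k := List.mem_range.mp hy
    have hdd : y / k < n := (Nat.div_lt_iff_lt_mul hk).mpr (by omega)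
    rw [min_eq_left (by omega)]

theorem pvMaster (pixel_data : List Int) (width height scale : Int)
    (hpre : Pre_nearest_neighbour_upscale pixel_data width height scale) :
    nearest_neighbour_upscale pixel_data width height scale
      = nearest_neighbour_upscale_alt pixel_data width height scale := by
  obtain ⟨hs0, hsw0, hor⟩ := hpre
  unfold nearest_neighbour_upscale nearest_neighbour_upscale_alt
  dsimp only
  set sw := PySem.Int.floordiv width scale with hswdef
  set src := (PySem.List.pyRange 0 (pixel_data.length : Int) sw).map
      (fun i => PySem.List.slice pixel_data (some i) (some (i + sw))) with hsrcdef
  by_cases hmain : 0 < sw ∧ 0 < scale ∧ pixel_data ≠ []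
  · obtain ⟨hsw, hs, hpd⟩ := hmain
    have hL : 0 < pixel_data.length := List.length_pos_iff.mpr hpd
    have hswmul : sw * scale ≤ width := by
      have hmod : 0 ≤ PySem.Int.mod width scale := by
        rw [PySem.Int.mod_eq_emod_of_pos hs]
        exact Int.emod_nonneg width (ne_of_gt hs)
      have h := PySem.Int.floordiv_mul_add_mod width scale
      rw [← hswdef] at h
      omega
    have hsrc : src ≠ [] := by
      rw [hsrcdef]
      simp only [ne_eq, List.map_eq_nil_iff]
      rw [PySem.List.pyRange_of_pos 0 (pixel_data.length : Int) hsw]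
      simp only [List.map_eq_nil_iff, List.range_eq_nil]
      intro hcount
      rw [if_pos (by omega)] at hcount
      have h1 : (1 : Int) ≤ ((pixel_data.length : Int) - 0 + sw - 1) / sw :=
        (Int.le_ediv_iff_mul_le hsw).mpr (by omega)
      omega
    have hmem : ∀ c ∈ src, c ≠ [] ∧ (c.length : Int) * scale ≤ width := by
      intro c hc
      rw [hsrcdef] at hc
      obtain ⟨i, hi, hslice⟩ := List.mem_map.mp hc
      obtain ⟨hi0, hiL, -⟩ := (PySem.List.mem_pyRange_iff_of_pos hsw i).mp hi
      rw [← hslice, PySem.List.slice_toNat pixel_data hi0 (by omega)]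
      have hlen : ((pixel_data.drop i.toNat).take ((i + sw).toNat - i.toNat)).length
          = min ((i + sw).toNat - i.toNat) (pixel_data.length - i.toNat) := by
        simp [List.length_take, List.length_drop]
      constructor
      · intro hnil
        rw [hnil] at hlen
        simp only [List.length_nil] at hlen
        omega
      · have h1 : ((pixel_data.drop i.toNat).take ((i + sw).toNat - i.toNat)).length ≤ sw.toNat := by
          rw [hlen]; omega
        have h2 : ((((pixel_data.drop i.toNat).take ((i + sw).toNat - i.toNat)).length : Nat) : Int) ≤ sw := by
          omega
        nlinarith
    exact pvMainSrc src width height scale hs hsrc hmem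
  · have hh : height ≤ 0 := by tauto
    have hdeg : src = [] ∨ scale < 0 := by
      by_cases hsc : 0 < scale
      · left
        rcases (by omega : sw < 0 ∨ 0 < sw) with hswneg | hswpos
        · rw [hsrcdef]
          simp only [List.map_eq_nil_iff]
          simp [PySem.List.pyRange]
          rw [if_neg (by omega), if_neg (by omega)]
          simp
        · have hpd : pixel_data = [] := by
            by_contra hpd
            exact hmain ⟨hswpos, hsc, hpd⟩
          rw [hsrcdef, hpd]
          simp [PySem.List.pyRange]
      · right; omega
    have hA : src.foldl (fun acc row =>
        acc ++ List.replicate scale.toNat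
          (if (((row.foldl (fun nr pixel => nr ++ List.replicate scale.toNat pixel) []).length : Int) < width)
            then (row.foldl (fun nr pixel => nr ++ List.replicate scale.toNat pixel) []) ++
              List.replicate (width - ((row.foldl (fun nr pixel => nr ++ List.replicate scale.toNat pixel) []).length : Int)).toNat
                (PySem.List.pyGetD row (-1) 0)
            else row.foldl (fun nr pixel => nr ++ List.replicate scale.toNat pixel) [])) [] = [] := by
      rcases hdeg with hnil | hneg
      · rw [hnil]
        rfl
      · have hz : scale.toNat = 0 := by omega
        rw [hz]
        rw [PySem.List.foldl_congr_mem src _ (fun acc _ => acc) []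
          (by intro acc row _; simp)]
        exact List.foldl_fixed src
    rw [hA]
    have hOH : max ((src.length : Int) * scale) height ≤ 0 := by
      rcases hdeg with hnil | hneg
      · rw [hnil]; simp; omega
      · have : ((src.length : Int)) * scale ≤ 0 := by
          nlinarith [Nat.cast_nonneg (α := Int) src.length]
        omega
    rw [PySem.List.pyRange_one_eq_nil hOH]
    simp only [List.length_nil, Nat.cast_zero]
    rw [if_neg (by omega)]
    rfl

-- ===== VERDICT (by name: the statement is the Claim_ definition above) =====
theorem nearest_neighbour_upscale_spec : Claim_equal_nearest_neighbour_upscale := by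
  intro pixel_data width height scale _ hpre
  exact pvMaster pixel_data width height scale hpre
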